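-- pv_equiv track=rewrite | github.com/NikiDimov/SoftUni-Python-Basics | for_loop/clever_Lily.py | safe_money
-- ===== SOURCE A (Python) =====
-- def safe_money(age, toy_price):
--     money = 0
--     counter = 0
--     for birthday in range(1, age + 1):
--         if birthday % 2 == 0:
--             counter += 1
--             money += 10*counter-1
--         else:
--             money += toy_price
--     return money
-- ===== SOURCE B (Python) =====
-- def safe_money(age, toy_price):
--     # Closed form: of birthdays 1..age, e = age//2 are even (the k-th even one
--     # gives 10*k-1) and the remaining age-e odd ones each cost toy_price.
--     n = age if age > 0 else 0
--     e = n // 2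
--     return 5 * e * (e + 1) - e + (n - e) * toy_price
-- ===== Notes on version B (the rewrite author's own statement) =====
-- stated objective: faster
-- what changed: Replaced the O(age) loop over birthdays by a closed-form arithmetic formula (sum of 10k-1 over the age//2 even birthdays plus toy_price times the odd ones).
import Mathlib
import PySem

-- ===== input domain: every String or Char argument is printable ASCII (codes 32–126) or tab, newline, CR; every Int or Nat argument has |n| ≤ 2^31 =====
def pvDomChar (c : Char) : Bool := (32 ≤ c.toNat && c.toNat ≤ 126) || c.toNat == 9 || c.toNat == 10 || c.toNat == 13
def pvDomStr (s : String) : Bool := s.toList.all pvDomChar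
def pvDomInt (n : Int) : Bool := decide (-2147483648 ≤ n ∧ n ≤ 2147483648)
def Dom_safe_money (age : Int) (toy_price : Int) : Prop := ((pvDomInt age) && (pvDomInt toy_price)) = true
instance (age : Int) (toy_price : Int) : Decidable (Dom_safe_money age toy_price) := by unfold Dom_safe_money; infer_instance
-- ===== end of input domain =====

-- B replaces A's O(age) loop by a closed-form arithmetic formula (objective: faster).

-- ===== PORT A =====
def safe_money (age : Int) (toy_price : Int) : Int :=
  ((PySem.List.pyRange 1 (age + 1) 1).foldl
    (fun (st : Int × Int) birthday =>
      if PySem.Int.mod birthday 2 = 0 then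
        (st.1 + (10 * (st.2 + 1) - 1), st.2 + 1)
      else
        (st.1 + toy_price, st.2))
    (0, 0)).1

-- ===== PORT B =====
def safe_money_alt (age : Int) (toy_price : Int) : Int :=
  let n := if age > 0 then age else 0
  let e := PySem.Int.floordiv n 2
  5 * e * (e + 1) - e + (n - e) * toy_price

-- ===== PRECONDITION & SPEC =====
def Spec_safe_money (age : Int) (toy_price : Int) (out : Int) : Prop := out = safe_money_alt age toy_price
instance (age : Int) (toy_price : Int) (out : Int) : Decidable (Spec_safe_money age toy_price out) := by unfold Spec_safe_money; infer_instance

-- ===== CLAIM (what is proved, stated in full; the proofs are below) =====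
def Claim_equal_safe_money : Prop := ∀ (age : Int) (toy_price : Int), Dom_safe_money age toy_price → Spec_safe_money age toy_price (safe_money age toy_price)

-- ===== LEMMAS AND PROOFS =====

-- invariant: after the birthdays 1..n the loop state is (closed form, n/2)
theorem safe_money_loop (tp : Int) (n : Nat) :
    (PySem.List.pyRange 1 ((n : Int) + 1) 1).foldl
      (fun (st : Int × Int) birthday =>
        if PySem.Int.mod birthday 2 = 0 then
          (st.1 + (10 * (st.2 + 1) - 1), st.2 + 1)
        else
          (st.1 + tp, st.2))
      (0, 0)
    = (5 * ((n / 2 : Nat) : Int) * (((n / 2 : Nat) : Int) + 1) - ((n / 2 : Nat) : Int)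
        + ((n : Int) - ((n / 2 : Nat) : Int)) * tp, ((n / 2 : Nat) : Int)) := by
  induction n with
  | zero => simp
  | succ m ih =>
      have h : PySem.List.pyRange 1 ((m : Int) + 1 + 1) 1
          = PySem.List.pyRange 1 ((m : Int) + 1) 1 ++ [(m : Int) + 1] := by
        have := PySem.List.pyRange_one_succ_right (a := 1) (b := (m : Int) + 1) (by omega)
        simpa using this
      have hm : ((m : Int) + 1 + 1) = (((m + 1 : Nat) : Int) + 1) := by push_cast; ring
      rw [← hm, h, List.foldl_append, ih]
      rcases Nat.even_or_odd (m + 1) with he | ho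
      · have hmod : PySem.Int.mod ((m : Int) + 1) 2 = 0 := by
          obtain ⟨k, hk⟩ := he
          simp [PySem.Int.mod, Int.fmod_eq_emod_of_nonneg _ (by omega : (0:Int) ≤ 2)]
          omega
        obtain ⟨k, hk⟩ := he
        have h1 : (m + 1) / 2 = m / 2 + 1 := by omega
        simp only [List.foldl, hmod, if_pos, h1, Prod.mk.injEq]
        constructor <;> (push_cast; ring)
      · have hmod : ¬ PySem.Int.mod ((m : Int) + 1) 2 = 0 := by
          obtain ⟨k, hk⟩ := ho
          simp [PySem.Int.mod, Int.fmod_eq_emod_of_nonneg _ (by omega : (0:Int) ≤ 2)]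
          omega
        obtain ⟨k, hk⟩ := ho
        have h1 : (m + 1) / 2 = m / 2 := by omega
        simp only [List.foldl, hmod, if_false, h1, Prod.mk.injEq]
        refine ⟨by push_cast; ring, trivial⟩

-- ===== VERDICT (by name: the statement is the Claim_ definition above) =====
theorem safe_money_spec : Claim_equal_safe_money := by
  intro age tp _
  unfold Spec_safe_money safe_money safe_money_alt
  by_cases hpos : age > 0
  · have hage : ((age.toNat : Nat) : Int) = age := Int.toNat_of_nonneg (by omega)
    rw [← hage, safe_money_loop tp age.toNat]
    have hf : PySem.Int.floordiv ((age.toNat : Nat) : Int) 2 = ((age.toNat / 2 : Nat) : Int) := by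
      simp [PySem.Int.floordiv, Int.fdiv_eq_ediv_of_nonneg _ (by omega : (0:Int) ≤ 2)]
    simp only [hage] at hf ⊢
    rw [if_pos hpos, hf]
  · have h0 : age ≤ 0 := by omega
    have hempty : PySem.List.pyRange 1 (age + 1) 1 = [] := by
      rw [PySem.List.pyRange_one]
      have h1 : (age + 1 - 1).toNat = 0 := by omega
      rw [h1]
      simp
    rw [hempty, if_neg hpos]
    simp [PySem.Int.floordiv, Int.zero_fdiv]
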